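-- pv_equiv track=rewrite | github.com/amitpp/hackerrank_tricks | reduce_to_zero.py | min_operations_to_zero
-- ===== SOURCE A (Python) =====
-- def min_operations_to_zero(n):
--     """
--     Find minimum number of operations required to add or subtract 2 raised to power k where k is a positive integer from the number to make it zero.
--     """
--     operations = 0
--     while n > 0:
--         if n & 1:  # n is odd i.e. last bit is 1 then we have to check if previous bit is 1 or 0
--             if n & 2:  # this returns true if second last bit is also 1
--                 n += 1  # if both last bits are 1 then we do +1 to make it even and then we can right shift
--             else:
--                 n -= 1  # if last bit is 1 and second last bit is 0 then we do -1 to make it even as substracting 1 from binary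
--                         # representation of a number or subtracting 1 from a decimal number is same
--             operations += 1   # whenever we encounter 1, we need to do at least one operation so we increment operations
--         n >>= 1  # if n is even i.e. zero at the end so left shift it as we want to reach next 1 bit
--     return operations
-- ===== SOURCE B (Python) =====
-- def min_operations_to_zero(n):
--     """
--     Find minimum number of operations required to add or subtract 2 raised to power k where k is a positive integer from the number to make it zero.
--     """
--     if n <= 0:
--         return 0
--     return bin(n ^ (3 * n)).count('1')
-- ===== Notes on version B (the rewrite author's own statement) =====
-- stated objective: simpler
-- what changed: Replaces A's bit-by-bit carry-simulation while-loop with the closed-form NAF-weight identity: the answer is the popcount of n XOR 3n, a single bit-parallel expression.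
import Mathlib
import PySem

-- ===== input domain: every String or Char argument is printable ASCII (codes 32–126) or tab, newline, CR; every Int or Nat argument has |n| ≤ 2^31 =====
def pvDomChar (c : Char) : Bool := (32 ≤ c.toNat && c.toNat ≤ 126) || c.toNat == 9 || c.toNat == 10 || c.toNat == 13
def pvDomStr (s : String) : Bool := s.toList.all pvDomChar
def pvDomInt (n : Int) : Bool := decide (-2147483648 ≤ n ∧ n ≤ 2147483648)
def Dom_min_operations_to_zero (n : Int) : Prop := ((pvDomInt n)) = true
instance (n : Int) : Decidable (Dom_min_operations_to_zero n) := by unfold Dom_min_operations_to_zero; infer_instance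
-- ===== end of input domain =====

-- B replaces A's bit-by-bit carry-simulation loop with the closed-form NAF-weight
-- identity popcount(n XOR 3n), a single bit-parallel expression (objective: simpler).

-- ===== PORT A =====
-- helper lemmas needed only for the termination of the port's while-loop
theorem pvLand_pos_ge_two (n : Int) (h : 0 < n) (h2 : Int.land n 2 ≠ 0) : 2 ≤ n := by
  obtain ⟨x, rfl⟩ := Int.eq_ofNat_of_zero_le h.le
  have hx : ¬ (x = 0 ∨ x = 1) := by
    rintro (rfl | rfl) <;> simp [Int.land] at h2
  omega

theorem pvShift_toNat (x : Nat) : (Int.shiftRight (↑x) 1).toNat = x / 2 := by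
  have h1 : Int.shiftRight (↑x) 1 = ((x >>> 1 : Nat) : Int) := rfl
  rw [h1, Int.toNat_natCast, Nat.shiftRight_succ, Nat.shiftRight_zero]

theorem pvDec_half (n : Int) (h : 0 < n) : (Int.shiftRight n 1).toNat < n.toNat := by
  obtain ⟨x, rfl⟩ := Int.eq_ofNat_of_zero_le h.le
  rw [pvShift_toNat]
  have hx : 0 < x := by exact_mod_cast h
  simp only [Int.toNat_natCast]
  omega

theorem pvDec_carry (n : Int) (h : 0 < n) (h2 : Int.land n 2 ≠ 0) :
    (Int.shiftRight (n + 1) 1).toNat < n.toNat := by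
  have h2' := pvLand_pos_ge_two n h h2
  obtain ⟨x, rfl⟩ := Int.eq_ofNat_of_zero_le h.le
  have hx : 2 ≤ x := by exact_mod_cast h2'
  have e : (↑x + 1 : Int) = ((x + 1 : Nat) : Int) := by push_cast; ring
  rw [e, pvShift_toNat, Int.toNat_natCast]
  omega

theorem pvDec_borrow (n : Int) (h : 0 < n) :
    (Int.shiftRight (n - 1) 1).toNat < n.toNat := by
  obtain ⟨x, rfl⟩ := Int.eq_ofNat_of_zero_le h.le
  have hx : 1 ≤ x := by exact_mod_cast h
  have e : (↑x - 1 : Int) = ((x - 1 : Nat) : Int) := by push_cast [hx]; ring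
  rw [e, pvShift_toNat, Int.toNat_natCast]
  omega

-- while-loop of A (state: n, operations)
def pvALoop (n : Int) (operations : Int) : Int :=
  if h : 0 < n then
    if h1 : Int.land n 1 ≠ 0 then
      if h2 : Int.land n 2 ≠ 0 then
        pvALoop (Int.shiftRight (n + 1) 1) (operations + 1)
      else
        pvALoop (Int.shiftRight (n - 1) 1) (operations + 1)
    else
      pvALoop (Int.shiftRight n 1) operations
  else
    operations
termination_by n.toNat
decreasing_by
  · exact pvDec_carry n h h2
  · exact pvDec_borrow n h
  · exact pvDec_half n h

def min_operations_to_zero (n : Int) : Int := pvALoop n 0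

-- ===== PORT B =====
-- port of Python's int.bit_count / bin(x).count('1') for a nonnegative integer
def pvPopCount : Nat → Nat
  | 0 => 0
  | x + 1 => (x + 1) % 2 + pvPopCount ((x + 1) / 2)
decreasing_by omega

def min_operations_to_zero_alt (n : Int) : Int :=
  if n ≤ 0 then 0
  else (pvPopCount (Int.toNat (Int.xor n (3 * n))) : Int)

-- ===== PRECONDITION & SPEC =====
def Spec_min_operations_to_zero (n : Int) (out : Int) : Prop := out = min_operations_to_zero_alt n
instance (n : Int) (out : Int) : Decidable (Spec_min_operations_to_zero n out) := by unfold Spec_min_operations_to_zero; infer_instance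

-- ===== CLAIM (what is proved, stated in full; the proofs are below) =====
def Claim_equal_min_operations_to_zero : Prop := ∀ (n : Int), Dom_min_operations_to_zero n → Spec_min_operations_to_zero n (min_operations_to_zero n)

-- ===== LEMMAS AND PROOFS =====

-- proof-side mirror of A's loop body on Nat: the NAF weight
def pvW (x : Nat) : Nat :=
  if _ : x = 0 then 0
  else if _ : x % 2 = 1 then
    if _ : x % 4 = 3 then 1 + pvW ((x + 1) / 2) else 1 + pvW ((x - 1) / 2)
  else pvW (x / 2)
termination_by x
decreasing_by all_goals omega

theorem pvW_zero : pvW 0 = 0 := by rw [pvW, dif_pos rfl]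

theorem pvW_even (m : Nat) : pvW (2 * m) = pvW m := by
  rcases Nat.eq_zero_or_pos m with rfl | hm
  · norm_num [pvW_zero]
  · rw [pvW, dif_neg (show ¬ 2 * m = 0 by omega), dif_neg (show ¬ 2 * m % 2 = 1 by omega),
      show 2 * m / 2 = m by omega]

theorem pvW_odd1 (m : Nat) : pvW (4 * m + 1) = 1 + pvW (2 * m) := by
  rw [pvW, dif_neg (show ¬ 4 * m + 1 = 0 by omega), dif_pos (show (4 * m + 1) % 2 = 1 by omega),
    dif_neg (show ¬ (4 * m + 1) % 4 = 3 by omega), show (4 * m + 1 - 1) / 2 = 2 * m by omega]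

theorem pvW_odd3 (m : Nat) : pvW (4 * m + 3) = 1 + pvW (m + 1) := by
  rw [pvW, dif_neg (show ¬ 4 * m + 3 = 0 by omega), dif_pos (show (4 * m + 3) % 2 = 1 by omega),
    dif_pos (show (4 * m + 3) % 4 = 3 by omega), show (4 * m + 3 + 1) / 2 = 2 * (m + 1) by omega,
    pvW_even]

-- popcount on a bit
theorem pvPc_zero : pvPopCount 0 = 0 := by rw [pvPopCount]

theorem pvPc_succ (x : Nat) : pvPopCount (x + 1) = (x + 1) % 2 + pvPopCount ((x + 1) / 2) := by
  rw [pvPopCount]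

theorem pvPc_bit (a i : Nat) (hi : i < 2) : pvPopCount (2 * a + i) = i + pvPopCount a := by
  rcases Nat.eq_zero_or_pos (2 * a + i) with h0 | hpos
  · have ha : a = 0 := by omega
    have hi0 : i = 0 := by omega
    subst ha; subst hi0; norm_num
  · obtain ⟨k, hk⟩ : ∃ k, 2 * a + i = k + 1 := ⟨2 * a + i - 1, by omega⟩
    rw [hk, pvPc_succ]
    have m1 : (k + 1) % 2 = i := by omega
    have m2 : (k + 1) / 2 = a := by omega
    rw [m1, m2]

theorem pvPc_even (a : Nat) : pvPopCount (2 * a) = pvPopCount a := by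
  simpa using pvPc_bit a 0 (by omega)

theorem pvPc_odd (a : Nat) : pvPopCount (2 * a + 1) = 1 + pvPopCount a := pvPc_bit a 1 (by omega)

-- xor on a bit
theorem pvXor_bit (a b i j : Nat) (hi : i < 2) (hj : j < 2) :
    (2 * a + i) ^^^ (2 * b + j) = 2 * (a ^^^ b) + (i + j) % 2 := by
  have hm : ((2 * a + i) ^^^ (2 * b + j)) % 2 = (i + j) % 2 := by
    rw [Nat.xor_mod_two_eq]; omega
  have hd : ((2 * a + i) ^^^ (2 * b + j)) / 2 = a ^^^ b := by
    rw [Nat.xor_div_two]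
    congr 1 <;> omega
  omega

theorem pvXor00 (a b : Nat) : (2 * a) ^^^ (2 * b) = 2 * (a ^^^ b) := by
  simpa using pvXor_bit a b 0 0 (by omega) (by omega)

theorem pvXor01 (a b : Nat) : (2 * a) ^^^ (2 * b + 1) = 2 * (a ^^^ b) + 1 := by
  simpa using pvXor_bit a b 0 1 (by omega) (by omega)

theorem pvXor10 (a b : Nat) : (2 * a + 1) ^^^ (2 * b) = 2 * (a ^^^ b) + 1 := by
  simpa using pvXor_bit a b 1 0 (by omega) (by omega)

theorem pvXor11 (a b : Nat) : (2 * a + 1) ^^^ (2 * b + 1) = 2 * (a ^^^ b) := by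
  simpa using pvXor_bit a b 1 1 (by omega) (by omega)

-- the NAF-weight identity, strengthened with the two carry variants
theorem pvG (x : Nat) :
    pvPopCount (x ^^^ 3 * x) = pvW x ∧
    pvPopCount (x ^^^ (3 * x + 1)) = pvW (2 * x + 1) ∧
    pvPopCount (x ^^^ (3 * x + 2)) = pvW (x + 1) := by
  induction x using Nat.strong_induction_on with
  | _ x ih =>
    rcases Nat.eq_zero_or_pos x with rfl | hx
    · have pc1 : pvPopCount 1 = 1 := by simpa [pvPc_zero] using pvPc_bit 0 1 (by omega)
      have pc2 : pvPopCount 2 = 1 := by simpa [pc1] using pvPc_even 1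
      have w1 : pvW 1 = 1 := by
        have h := pvW_odd1 0
        norm_num [pvW_zero] at h
        exact h
      refine ⟨by norm_num [pvPc_zero, pvW_zero], by norm_num [pc1, w1], by norm_num [pc2, w1]⟩
    · obtain ⟨m, hm⟩ : ∃ m, x = 2 * m ∨ x = 2 * m + 1 := ⟨x / 2, by omega⟩
      have hmx : m < x := by omega
      obtain ⟨I1, I2, I3⟩ := ih m hmx
      rcases hm with rfl | rfl
      · refine ⟨?_, ?_, ?_⟩
        · rw [show 3 * (2 * m) = 2 * (3 * m) by ring, pvXor00, pvPc_even, I1, pvW_even]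
        · rw [show 3 * (2 * m) + 1 = 2 * (3 * m) + 1 by ring, pvXor01, pvPc_odd, I1,
            show 2 * (2 * m) + 1 = 4 * m + 1 by ring, pvW_odd1, pvW_even]
        · rw [show 3 * (2 * m) + 2 = 2 * (3 * m + 1) by ring, pvXor00, pvPc_even, I2]
      · refine ⟨?_, ?_, ?_⟩
        · rw [show 3 * (2 * m + 1) = 2 * (3 * m + 1) + 1 by ring, pvXor11, pvPc_even, I2]
        · rw [show 3 * (2 * m + 1) + 1 = 2 * (3 * m + 2) by ring, pvXor10, pvPc_odd, I3,
            show 2 * (2 * m + 1) + 1 = 4 * m + 3 by ring, pvW_odd3]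
        · rw [show 3 * (2 * m + 1) + 2 = 2 * (3 * m + 2) + 1 by ring, pvXor11, pvPc_even, I3,
            show 2 * m + 1 + 1 = 2 * (m + 1) by ring, pvW_even]

-- evaluating A's bit tests on a natural number
theorem pvLandNat (a b : Nat) : Int.land ↑a ↑b = ↑(a &&& b) := rfl

theorem pvAnd_two (x : Nat) : x &&& 2 = 2 * (x / 2 % 2) := by
  have h1 : (x &&& 2) / 2 = x / 2 % 2 := by
    rw [Nat.and_div_two]
    norm_num [Nat.and_one_is_mod]
  have h2 : (x &&& 2) % 2 = 0 := by
    rw [← Nat.and_one_is_mod, Nat.and_assoc]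
    norm_num
  omega

-- A's loop computes the NAF weight
theorem pvALoop_eq (x : Nat) : ∀ ops : Int, pvALoop ↑x ops = ops + ↑(pvW x) := by
  induction x using Nat.strong_induction_on with
  | _ x ih =>
    intro ops
    rcases Nat.eq_zero_or_pos x with rfl | hx
    · rw [pvALoop, pvW_zero]
      norm_num
    · rw [pvALoop]
      have hpos : (0 : Int) < ↑x := by exact_mod_cast hx
      rw [dif_pos hpos]
      have e1 : Int.land ↑x 1 = ((x &&& 1 : Nat) : Int) := pvLandNat x 1
      have e2 : Int.land ↑x 2 = ((x &&& 2 : Nat) : Int) := pvLandNat x 2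
      by_cases hodd : x % 2 = 1
      · have h1 : Int.land ↑x 1 ≠ 0 := by
          rw [e1, Nat.and_one_is_mod, hodd]; norm_num
        rw [dif_pos h1]
        by_cases hb2 : x / 2 % 2 = 1
        · have h2 : Int.land ↑x 2 ≠ 0 := by
            rw [e2, pvAnd_two, hb2]; norm_num
          rw [dif_pos h2]
          have es : Int.shiftRight (↑x + 1) 1 = (((x + 1) / 2 : Nat) : Int) := by
            rw [show (↑x + 1 : Int) = ((x + 1 : Nat) : Int) by push_cast; ring]
            have h' : Int.shiftRight ((x + 1 : Nat) : Int) 1 = (((x + 1) >>> 1 : Nat) : Int) := rfl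
            rw [h', Nat.shiftRight_succ, Nat.shiftRight_zero]
          rw [es, ih ((x + 1) / 2) (by omega)]
          have hw : pvW x = 1 + pvW ((x + 1) / 2) := by
            rw [pvW, dif_neg (show ¬ x = 0 by omega), dif_pos hodd,
              dif_pos (show x % 4 = 3 by omega)]
          rw [hw]
          push_cast
          ring
        · have h2 : ¬ Int.land ↑x 2 ≠ 0 := by
            rw [e2, pvAnd_two, (by omega : x / 2 % 2 = 0)]; norm_num
          rw [dif_neg h2]
          have es : Int.shiftRight (↑x - 1) 1 = (((x - 1) / 2 : Nat) : Int) := by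
            rw [show (↑x - 1 : Int) = ((x - 1 : Nat) : Int) by push_cast [hx]; ring]
            have h' : Int.shiftRight ((x - 1 : Nat) : Int) 1 = (((x - 1) >>> 1 : Nat) : Int) := rfl
            rw [h', Nat.shiftRight_succ, Nat.shiftRight_zero]
          rw [es, ih ((x - 1) / 2) (by omega)]
          have hw : pvW x = 1 + pvW ((x - 1) / 2) := by
            rw [pvW, dif_neg (show ¬ x = 0 by omega), dif_pos hodd,
              dif_neg (show ¬ x % 4 = 3 by omega)]
          rw [hw]
          push_cast
          ring
      · have h1 : ¬ Int.land ↑x 1 ≠ 0 := by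
          rw [e1, Nat.and_one_is_mod, (by omega : x % 2 = 0)]; norm_num
        rw [dif_neg h1]
        have es : Int.shiftRight (↑x) 1 = ((x / 2 : Nat) : Int) := by
          have h' : Int.shiftRight ((x : Nat) : Int) 1 = ((x >>> 1 : Nat) : Int) := rfl
          rw [h', Nat.shiftRight_succ, Nat.shiftRight_zero]
        rw [es, ih (x / 2) (by omega)]
        have hw : pvW x = pvW (x / 2) := by
          rw [pvW, dif_neg (show ¬ x = 0 by omega), dif_neg hodd]
        rw [hw]

theorem pvXorNat (a b : Nat) : Int.xor ↑a ↑b = ↑(a ^^^ b) := rfl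

-- ===== VERDICT (by name: the statement is the Claim_ definition above) =====
theorem min_operations_to_zero_spec : Claim_equal_min_operations_to_zero := by
  intro n _
  unfold Spec_min_operations_to_zero min_operations_to_zero min_operations_to_zero_alt
  by_cases hn : n ≤ 0
  · rw [pvALoop, dif_neg (by omega), if_pos hn]
  · have hpos : 0 < n := by omega
    obtain ⟨x, rfl⟩ := Int.eq_ofNat_of_zero_le hpos.le
    rw [if_neg hn, pvALoop_eq x 0]
    have e3 : (3 * (↑x : Int)) = ((3 * x : Nat) : Int) := by push_cast; ring
    rw [e3, pvXorNat, Int.toNat_natCast]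
    have := (pvG x).1
    rw [this]
    ring
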